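-- pv_equiv track=rewrite | github.com/kannanParamasivam/datastructures_and_algorithm | board/zombie_in_board.py | min_hours
-- ===== SOURCE A (Python) =====
-- from typing import List
-- from queue import deque
-- from collections import namedtuple
--
-- Zombie = namedtuple('Zombie', ['position', 'gen'])
--
-- def min_hours(grid: List[List[int]]) -> int:
--
--     if not grid or not grid[0]:
--         return 0
--
--     q = deque()
--
--     for row in range(len(grid)):
--
--         for col in range(len(grid[row])):
--
--             if grid[row][col] == 1:
--                 q.append(Zombie((row, col), 0))
--
--     n_offsets = [(-1, 0), (1, 0), (0, -1), (0, 1)]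
--     max_gen = 0
--
--     while len(q) > 0:
--
--         pos, gen = q.popleft()
--
--         for offset in n_offsets:
--
--             row = offset[0] + pos[0]
--             col = offset[1] + pos[1]
--
--             if 0 <= row < len(grid) and 0 <= col < len(grid[row]) and grid[row][col] == 0:
--                 grid[row][col] = 1
--                 q.append((Zombie(row, col), gen + 1))
--                 max_gen = max(max_gen, gen+1)
--
--     return max_gen
-- ===== SOURCE B (Python) =====
-- from typing import List
--
-- def min_hours(grid: List[List[int]]) -> int:
--     # Level-by-level multi-source BFS: no per-node generation tags, just count
--     # one hour per level that infects at least one new cell.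
--     if not grid or not grid[0]:
--         return 0
--
--     frontier = [(r, c)
--                 for r in range(len(grid))
--                 for c in range(len(grid[r]))
--                 if grid[r][c] == 1]
--
--     hours = 0
--     while frontier:
--         nxt = []
--         for r, c in frontier:
--             for dr, dc in ((-1, 0), (1, 0), (0, -1), (0, 1)):
--                 nr, nc = r + dr, c + dc
--                 if 0 <= nr < len(grid) and 0 <= nc < len(grid[nr]) and grid[nr][nc] == 0:
--                     grid[nr][nc] = 1
--                     nxt.append((nr, nc))
--         if nxt:
--             hours += 1
--         frontier = nxt
--     return hours
-- ===== Notes on version B (the rewrite author's own statement) =====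
-- stated objective: idiomatic
-- what changed: Replaces A's single deque of gen-tagged Zombie nodes (each popped cell carrying its generation, tracked via a running max) by the idiomatic level-by-level BFS: process the whole frontier, collect the next frontier, and add one hour per level that infected at least one cell.
import Mathlib
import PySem

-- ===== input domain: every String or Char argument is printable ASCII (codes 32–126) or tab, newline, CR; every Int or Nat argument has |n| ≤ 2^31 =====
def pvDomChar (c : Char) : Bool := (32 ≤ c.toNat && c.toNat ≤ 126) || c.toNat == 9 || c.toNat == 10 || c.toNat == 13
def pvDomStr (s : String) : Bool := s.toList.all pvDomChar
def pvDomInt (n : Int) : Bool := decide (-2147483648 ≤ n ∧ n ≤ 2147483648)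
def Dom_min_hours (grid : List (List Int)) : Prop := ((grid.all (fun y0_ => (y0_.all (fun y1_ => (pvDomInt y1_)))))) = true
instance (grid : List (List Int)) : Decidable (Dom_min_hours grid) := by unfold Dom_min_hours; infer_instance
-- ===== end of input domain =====

-- B replaces A's gen-tagged deque BFS by level-by-level BFS counting hours per
-- infecting level (objective: simpler/idiomatic; same asymptotic cost).
-- Both Pythons mutate `grid` identically; the equivalence proved is about the return value.

-- ===== PORT A =====
-- shared low-level primitives (the identical inline expressions occur in both Pythons)
def rowAt (grid : List (List Int)) (r : Int) : List Int := grid.getD r.toNat []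

-- Python '0 <= row < len(grid) and 0 <= col < len(grid[row]) and grid[row][col] == 0'
def spread? (grid : List (List Int)) (r c : Int) : Bool :=
  decide (0 ≤ r) && decide (r < (grid.length : Int)) &&
  decide (0 ≤ c) && decide (c < ((rowAt grid r).length : Int)) &&
  ((rowAt grid r).getD c.toNat 1 == 0)

-- Python 'grid[row][col] = 1' (indices guarded nonnegative and in range by spread?)
def infect (grid : List (List Int)) (r c : Int) : List (List Int) :=
  grid.set r.toNat ((rowAt grid r).set c.toNat 1)

def offsets : List (Int × Int) := [(-1, 0), (1, 0), (0, -1), (0, 1)]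

-- number of 0-cells; only used as a termination measure and in the proofs
def zeros (grid : List (List Int)) : Nat := (grid.map (fun row => row.count 0)).sum

lemma zeros_cons (a : List Int) (l : List (List Int)) :
    zeros (a :: l) = a.count 0 + zeros l := by simp [zeros]

lemma count_set_one (l : List Int) (i : Nat) (hi : i < l.length) (h0 : l.getD i 1 = 0) :
    (l.set i 1).count 0 + 1 ≤ l.count 0 := by
  induction l generalizing i with
  | nil => simp at hi
  | cons a l ih =>
    cases i with
    | zero =>
      simp [List.getD] at h0
      subst h0
      simp
    | succ i =>
      simp only [List.set, List.count_cons]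
      have := ih i (by simpa using hi) (by simpa [List.getD] using h0)
      split <;> omega

lemma zeros_set_eq (grid : List (List Int)) (i : Nat) (row' : List Int) (hi : i < grid.length) :
    zeros (grid.set i row') + (grid.getD i []).count 0 = zeros grid + row'.count 0 := by
  induction grid generalizing i with
  | nil => simp at hi
  | cons a l ih =>
    cases i with
    | zero => simp [zeros, List.getD]; omega
    | succ i =>
      have := ih i (by simpa using hi)
      simp only [List.set_cons_succ, List.getD_cons_succ, zeros_cons] at *
      omega

lemma infect_zeros (grid : List (List Int)) (r c : Int) (h : spread? grid r c = true) :
    zeros (infect grid r c) + 1 ≤ zeros grid := by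
  unfold spread? at h
  simp only [Bool.and_eq_true, decide_eq_true_eq, beq_iff_eq] at h
  obtain ⟨⟨⟨⟨hr0, hrl⟩, hc0⟩, hcl⟩, h0⟩ := h
  have hi : r.toNat < grid.length := by omega
  have hc : c.toNat < (rowAt grid r).length := by omega
  have h1 := count_set_one (rowAt grid r) c.toNat hc h0
  have h2 := zeros_set_eq grid r.toNat ((rowAt grid r).set c.toNat 1) hi
  unfold infect
  unfold rowAt at *
  omega

def stepA (p : Int × Int) (g : Int)
    (st : List (List Int) × List ((Int × Int) × Int) × Int) (off : Int × Int) :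
    List (List Int) × List ((Int × Int) × Int) × Int :=
  let r := off.1 + p.1
  let c := off.2 + p.2
  if spread? st.1 r c then
    (infect st.1 r c, st.2.1 ++ [((r, c), g + 1)], max st.2.2 (g + 1))
  else st

lemma stepA_measure (p : Int × Int) (g : Int)
    (st : List (List Int) × List ((Int × Int) × Int) × Int) (off : Int × Int) :
    zeros (stepA p g st off).1 + (stepA p g st off).2.1.length ≤ zeros st.1 + st.2.1.length := by
  unfold stepA
  dsimp only
  split
  · rename_i h
    have := infect_zeros st.1 _ _ h
    simp only [List.length_append, List.length_cons, List.length_nil]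
    omega
  · exact le_rfl

lemma foldA_measure (offs : List (Int × Int)) (p : Int × Int) (g : Int)
    (st : List (List Int) × List ((Int × Int) × Int) × Int) :
    zeros (offs.foldl (stepA p g) st).1 + (offs.foldl (stepA p g) st).2.1.length
      ≤ zeros st.1 + st.2.1.length := by
  induction offs generalizing st with
  | nil => exact le_rfl
  | cons off offs ih => exact le_trans (ih (stepA p g st off)) (stepA_measure p g st off)

def loopA (grid : List (List Int)) (q : List ((Int × Int) × Int)) (maxg : Int) : Int :=
  match q with
  | [] => maxg
  | (pos, gen) :: rest =>
      let st := offsets.foldl (stepA pos gen) (grid, rest, maxg)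
      loopA st.1 st.2.1 st.2.2
termination_by zeros grid + q.length
decreasing_by
  have := foldA_measure offsets pos gen (grid, rest, maxg)
  dsimp only at this
  simp only [List.length_cons]
  omega

def seedA (grid : List (List Int)) : List ((Int × Int) × Int) :=
  (List.range grid.length).foldl
    (fun q row =>
      (List.range (grid.getD row []).length).foldl
        (fun q2 col =>
          if (grid.getD row []).getD col 0 == 1 then
            q2 ++ [(((row : Int), (col : Int)), 0)]
          else q2)
        q)
    []

def min_hours (grid : List (List Int)) : Int :=
  if grid.isEmpty || (grid.headD []).isEmpty then 0
  else loopA grid (seedA grid) 0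

-- ===== PORT B =====
def stepB (p : Int × Int) (st : List (List Int) × List (Int × Int)) (off : Int × Int) :
    List (List Int) × List (Int × Int) :=
  let r := off.1 + p.1
  let c := off.2 + p.2
  if spread? st.1 r c then (infect st.1 r c, st.2 ++ [(r, c)]) else st

lemma stepB_measure (p : Int × Int) (st : List (List Int) × List (Int × Int)) (off : Int × Int) :
    zeros (stepB p st off).1 + (stepB p st off).2.length ≤ zeros st.1 + st.2.length := by
  unfold stepB
  dsimp only
  split
  · rename_i h
    have := infect_zeros st.1 _ _ h
    simp only [List.length_append, List.length_cons, List.length_nil]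
    omega
  · exact le_rfl

lemma foldB_measure (offs : List (Int × Int)) (p : Int × Int)
    (st : List (List Int) × List (Int × Int)) :
    zeros (offs.foldl (stepB p) st).1 + (offs.foldl (stepB p) st).2.length
      ≤ zeros st.1 + st.2.length := by
  induction offs generalizing st with
  | nil => exact le_rfl
  | cons off offs ih => exact le_trans (ih (stepB p st off)) (stepB_measure p st off)

lemma levelfold_measure (cur : List (Int × Int)) (st : List (List Int) × List (Int × Int)) :
    zeros (cur.foldl (fun st pp => offsets.foldl (stepB pp) st) st).1
      + (cur.foldl (fun st pp => offsets.foldl (stepB pp) st) st).2.length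
      ≤ zeros st.1 + st.2.length := by
  induction cur generalizing st with
  | nil => exact le_rfl
  | cons p cur ih => exact le_trans (ih _) (foldB_measure offsets p st)

def levelB (grid : List (List Int)) (cur : List (Int × Int)) :
    List (List Int) × List (Int × Int) :=
  cur.foldl (fun st pp => offsets.foldl (stepB pp) st) (grid, [])

def loopB (grid : List (List Int)) (q : List (Int × Int)) (hours : Int) : Int :=
  match q with
  | [] => hours
  | _ :: _ =>
      let st := levelB grid q
      loopB st.1 st.2 (if st.2.isEmpty then hours else hours + 1)
termination_by zeros grid + q.length
decreasing_by
  have := levelfold_measure q (grid, [])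
  dsimp only at this
  simp only [List.length_nil, Nat.add_zero] at this
  simp only [List.length_cons]
  unfold levelB
  omega

def seedB (grid : List (List Int)) : List (Int × Int) :=
  (List.range grid.length).flatMap (fun r =>
    ((List.range (grid.getD r []).length).filter
        (fun c => (grid.getD r []).getD c 0 == 1)).map
      (fun c => ((r : Int), (c : Int))))

def min_hours_alt (grid : List (List Int)) : Int :=
  if grid.isEmpty || (grid.headD []).isEmpty then 0
  else loopB grid (seedB grid) 0

-- ===== PRECONDITION & SPEC =====
def Spec_min_hours (grid : List (List Int)) (out : Int) : Prop := out = min_hours_alt grid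
instance (grid : List (List Int)) (out : Int) : Decidable (Spec_min_hours grid out) := by unfold Spec_min_hours; infer_instance

-- ===== CLAIM (what is proved, stated in full; the proofs are below) =====
def Claim_equal_min_hours : Prop := ∀ (grid : List (List Int)), Dom_min_hours grid → Spec_min_hours grid (min_hours grid)

-- ===== LEMMAS AND PROOFS =====

lemma loopA_nil (grid : List (List Int)) (maxg : Int) : loopA grid [] maxg = maxg := by
  rw [loopA.eq_def]

lemma loopB_nil (grid : List (List Int)) (hours : Int) : loopB grid [] hours = hours := by
  rw [loopB.eq_def]

lemma loopB_cons (grid : List (List Int)) (p : Int × Int) (rest : List (Int × Int)) (hours : Int) :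
    loopB grid (p :: rest) hours
      = loopB (levelB grid (p :: rest)).1 (levelB grid (p :: rest)).2
          (if (levelB grid (p :: rest)).2.isEmpty then hours else hours + 1) := by
  rw [loopB.eq_def]

lemma foldB_len_mono (offs : List (Int × Int)) (p : Int × Int)
    (st : List (List Int) × List (Int × Int)) :
    st.2.length ≤ (offs.foldl (stepB p) st).2.length := by
  induction offs generalizing st with
  | nil => exact le_rfl
  | cons off offs ih =>
    refine le_trans ?_ (ih (stepB p st off))
    unfold stepB
    dsimp only
    split
    · simp
    · exact le_rfl

lemma levelfold_len_mono (cur : List (Int × Int)) (st : List (List Int) × List (Int × Int)) :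
    st.2.length ≤ (cur.foldl (fun st pp => offsets.foldl (stepB pp) st) st).2.length := by
  induction cur generalizing st with
  | nil => exact le_rfl
  | cons p cur ih => exact le_trans (foldB_len_mono offsets p st) (ih _)

lemma max_absorb (a b : Int) : max (max a b) b = max a b := by
  rw [max_assoc, max_self]

lemma cell_corr (offs : List (Int × Int)) (grid : List (List Int))
    (pref : List ((Int × Int) × Int)) (acc : List (Int × Int)) (maxg g : Int) (p : Int × Int) :
    offs.foldl (stepA p g) (grid, pref ++ acc.map (fun x => (x, g + 1)), maxg)
      = ((offs.foldl (stepB p) (grid, acc)).1,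
         pref ++ ((offs.foldl (stepB p) (grid, acc)).2).map (fun x => (x, g + 1)),
         if (offs.foldl (stepB p) (grid, acc)).2.length = acc.length then maxg
         else max maxg (g + 1)) := by
  induction offs generalizing grid acc maxg with
  | nil => simp
  | cons off offs ih =>
    simp only [List.foldl_cons]
    by_cases h : spread? grid (off.1 + p.1) (off.2 + p.2)
    · have hstA : stepA p g (grid, pref ++ acc.map (fun x => (x, g + 1)), maxg) off
          = (infect grid (off.1 + p.1) (off.2 + p.2),
             pref ++ ((acc ++ [(off.1 + p.1, off.2 + p.2)]).map (fun x => (x, g + 1))),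
             max maxg (g + 1)) := by
        simp [stepA, h, List.map_append, List.append_assoc]
      have hstB : stepB p (grid, acc) off
          = (infect grid (off.1 + p.1) (off.2 + p.2), acc ++ [(off.1 + p.1, off.2 + p.2)]) := by
        simp [stepB, h]
      simp only [hstA, hstB]
      rw [ih (infect grid (off.1 + p.1) (off.2 + p.2)) (acc ++ [(off.1 + p.1, off.2 + p.2)])
            (max maxg (g + 1))]
      have hmono := foldB_len_mono offs p
        (infect grid (off.1 + p.1) (off.2 + p.2), acc ++ [(off.1 + p.1, off.2 + p.2)])
      simp only [List.length_append, List.length_cons, List.length_nil] at hmono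
      have hne : (offs.foldl (stepB p)
          (infect grid (off.1 + p.1) (off.2 + p.2),
           acc ++ [(off.1 + p.1, off.2 + p.2)])).2.length ≠ acc.length := by omega
      rw [if_neg hne]
      split
      · rfl
      · rw [max_absorb]
    · have hstA : stepA p g (grid, pref ++ acc.map (fun x => (x, g + 1)), maxg) off
          = (grid, pref ++ acc.map (fun x => (x, g + 1)), maxg) := by
        simp [stepA, h]
      have hstB : stepB p (grid, acc) off = (grid, acc) := by
        simp [stepB, h]
      simp only [hstA, hstB]
      exact ih grid acc maxg

lemma phase (cur : List (Int × Int)) (grid : List (List Int)) (acc : List (Int × Int))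
    (maxg g : Int) :
    loopA grid (cur.map (fun x => (x, g)) ++ acc.map (fun x => (x, g + 1))) maxg
      = loopA (cur.foldl (fun st pp => offsets.foldl (stepB pp) st) (grid, acc)).1
          ((cur.foldl (fun st pp => offsets.foldl (stepB pp) st) (grid, acc)).2.map
            (fun x => (x, g + 1)))
          (if (cur.foldl (fun st pp => offsets.foldl (stepB pp) st) (grid, acc)).2.length
              = acc.length then maxg else max maxg (g + 1)) := by
  induction cur generalizing grid acc maxg with
  | nil => simp
  | cons p cur ih =>
    simp only [List.map_cons, List.cons_append, List.foldl_cons]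
    rw [loopA]
    rw [cell_corr offsets grid (cur.map (fun x => (x, g))) acc maxg g p]
    rw [ih (offsets.foldl (stepB p) (grid, acc)).1 (offsets.foldl (stepB p) (grid, acc)).2
          (if (offsets.foldl (stepB p) (grid, acc)).2.length = acc.length then maxg
           else max maxg (g + 1))]
    have h1 := foldB_len_mono offsets p (grid, acc)
    dsimp only at h1
    have h2 := levelfold_len_mono cur (offsets.foldl (stepB p) (grid, acc))
    simp only [Prod.mk.eta]
    by_cases hA : (offsets.foldl (stepB p) (grid, acc)).2.length = acc.length
    · simp only [hA]
      exact congrArg (loopA _ _) (if_congr Iff.rfl rfl rfl)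
    · rw [if_neg hA]
      have hne : (cur.foldl (fun st pp => offsets.foldl (stepB pp) st)
          (offsets.foldl (stepB p) (grid, acc))).2.length ≠ acc.length := by omega
      rw [if_neg hne]
      split
      · rfl
      · rw [max_absorb]

lemma main_loop (n : Nat) : ∀ (grid : List (List Int)) (cur : List (Int × Int)) (g : Int),
    zeros grid + cur.length ≤ n →
    loopA grid (cur.map (fun x => (x, g))) g = loopB grid cur g := by
  induction n using Nat.strong_induction_on with
  | _ n ih =>
    intro grid cur g h
    cases cur with
    | nil => rw [List.map_nil, loopA_nil, loopB_nil]
    | cons p cur =>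
      have hphase := phase (p :: cur) grid [] g g
      simp only [List.map_nil, List.append_nil, List.length_nil] at hphase
      rw [hphase]
      have hmeas := levelfold_measure (p :: cur) (grid, [])
      dsimp only at hmeas
      simp only [List.length_nil, Nat.add_zero] at hmeas
      rw [loopB_cons]
      simp only [levelB]
      by_cases hz : ((p :: cur).foldl (fun st pp => offsets.foldl (stepB pp) st) (grid, [])).2 = []
      · simp only [hz, List.map_nil, List.length_nil, List.isEmpty_nil, reduceIte]
        rw [loopA_nil, loopB_nil]
      · have hlen : ((p :: cur).foldl (fun st pp => offsets.foldl (stepB pp) st) (grid, [])).2.length ≠ 0 := by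
          simpa [List.length_eq_zero_iff] using hz
        rw [if_neg hlen]
        have hmax : max g (g + 1) = g + 1 := by apply max_eq_right; omega
        rw [hmax]
        have hemp : (((p :: cur).foldl (fun st pp => offsets.foldl (stepB pp) st) (grid, [])).2).isEmpty = false := by
          simpa [List.isEmpty_iff] using hz
        simp only [hemp, Bool.false_eq_true, if_false]
        have hlt : zeros ((p :: cur).foldl (fun st pp => offsets.foldl (stepB pp) st) (grid, [])).1
            + ((p :: cur).foldl (fun st pp => offsets.foldl (stepB pp) st) (grid, [])).2.length < n := by
          simp only [List.length_cons] at h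
          omega
        exact ih _ hlt _ _ (g + 1) le_rfl

lemma seed_corr (grid : List (List Int)) :
    seedA grid = (seedB grid).map (fun p => (p, (0 : Int))) := by
  unfold seedA seedB
  simp only [PySem.List.foldl_append_if]
  rw [PySem.List.foldl_append_eq_flatMap]
  simp only [List.nil_append, List.map_flatMap]
  refine congrArg (fun f => List.flatMap f (List.range grid.length)) (funext fun r => ?_)
  induction List.filter (fun c => (grid.getD r []).getD c 0 == 1) (List.range (grid.getD r []).length) with
  | nil => rfl
  | cons a l ih => simp only [List.map_cons] at *; simp [ih]

lemma min_hours_eq (grid : List (List Int)) : min_hours grid = min_hours_alt grid := by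
  unfold min_hours min_hours_alt
  split
  · rfl
  · rw [seed_corr]
    exact main_loop (zeros grid + (seedB grid).length) grid (seedB grid) 0 le_rfl

-- ===== VERDICT (by name: the statement is the Claim_ definition above) =====
theorem min_hours_spec : Claim_equal_min_hours := by
  intro grid _
  exact min_hours_eq grid
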